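-- pv_equiv track=rewrite | github.com/limkeunhyeok/algorithm-study | keunhak/est/prob3.py | solution
-- ===== SOURCE A (Python) =====
-- def solution(u,l,c):
--     if sum(c) != u + l:
--         return 'IMPOSSIBLE'
--     else:
--         m = [[0 for i in range(len(c))] for j in range(2)]
--         u_cnt = 0
--         l_cnt = 0
--
--         for i in range(len(c)):
--             if c[i] == 2:
--                 m[0][i] = 1
--                 m[1][i] = 1
--                 u_cnt += 1
--                 l_cnt += 1
--
--         for i in range(len(c)):
--             if c[i] == 1:
--                 if u_cnt < u:
--                     m[0][i] = 1
--                     u_cnt += 1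
--                 elif l_cnt < l:
--                     m[1][i] = 1
--                     l_cnt += 1
--             else:
--                 continue
--
--         ans = ''
--         for i in range(2):
--             for j in range(len(c)):
--                 ans += str(m[i][j])
--             ans += ','
--
--         return ans[:len(c) * 2 + 1]
-- ===== SOURCE B (Python) =====
-- def solution(u, l, c):
--     if sum(c) != u + l:
--         return 'IMPOSSIBLE'
--     twos = c.count(2)
--     ones = [i for i, x in enumerate(c) if x == 1]
--     a = max(0, u - twos)
--     b = max(0, l - twos)
--     up = set(ones[:a])
--     low = set(ones[a:a + b])
--     top = ''.join('1' if x == 2 or i in up else '0' for i, x in enumerate(c))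
--     bot = ''.join('1' if x == 2 or i in low else '0' for i, x in enumerate(c))
--     return top + ',' + bot
-- ===== Notes on version B (the rewrite author's own statement) =====
-- stated objective: alternative
-- what changed: B replaces A's greedy simulation (2xn matrix with running u_cnt/l_cnt counters over three index loops and a trailing-comma slice) by a positional computation: it derives closed-form slot budgets max(0,u-count2)/max(0,l-count2), slices the precomputed list of 1-positions into two membership sets, and renders each row by set lookup.
import Mathlib
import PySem

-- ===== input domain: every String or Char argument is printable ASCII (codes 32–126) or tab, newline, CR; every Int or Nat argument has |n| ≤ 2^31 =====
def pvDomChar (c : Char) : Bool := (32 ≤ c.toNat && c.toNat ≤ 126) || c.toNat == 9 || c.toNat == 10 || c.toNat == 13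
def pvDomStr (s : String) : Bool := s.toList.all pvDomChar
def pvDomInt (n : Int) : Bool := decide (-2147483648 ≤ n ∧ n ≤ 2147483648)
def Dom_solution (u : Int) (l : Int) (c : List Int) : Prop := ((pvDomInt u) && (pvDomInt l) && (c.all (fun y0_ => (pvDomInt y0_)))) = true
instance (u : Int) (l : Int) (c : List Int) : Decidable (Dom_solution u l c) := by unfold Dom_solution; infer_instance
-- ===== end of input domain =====

-- B replaces A's greedy counter simulation (2×n matrix, running u_cnt/l_cnt, three index
-- loops, trailing-comma slice) by a positional computation: it precomputes how many
-- 1-columns go to each row, slices the list of 1-positions into the two membership sets,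
-- and renders each row by a lookup (objective: simpler/alternative).

-- ===== PORT A =====
-- loop state throughout: (row m[0], row m[1], u_cnt, l_cnt)
def solution (u : Int) (l : Int) (c : List Int) : String :=
  if c.sum ≠ u + l then "IMPOSSIBLE"
  else
    let n := c.length
    let m0 : List Int := (List.range n).map (fun _ => 0)
    let m1 : List Int := (List.range n).map (fun _ => 0)
    let s1 := (List.range n).foldl
      (fun (s : List Int × List Int × Int × Int) i =>
        if c.getD i 0 == 2 then (s.1.set i 1, s.2.1.set i 1, s.2.2.1 + 1, s.2.2.2 + 1) else s)
      (m0, m1, 0, 0)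
    let s2 := (List.range n).foldl
      (fun (s : List Int × List Int × Int × Int) i =>
        if c.getD i 0 == 1 then
          if s.2.2.1 < u then (s.1.set i 1, s.2.1, s.2.2.1 + 1, s.2.2.2)
          else if s.2.2.2 < l then (s.1, s.2.1.set i 1, s.2.2.1, s.2.2.2 + 1)
          else s
        else s)
      s1
    let ans : List Char := [s2.1, s2.2.1].foldl
      (fun a row => (row.foldl (fun a v => a ++ PySem.Int.toChars v) a) ++ [',']) []
    String.ofList (PySem.List.slice ans none (some ((n : Int) * 2 + 1)))

-- ===== PORT B =====
def solution_alt (u : Int) (l : Int) (c : List Int) : String :=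
  if c.sum ≠ u + l then "IMPOSSIBLE"
  else
    let twos : Int := (c.count 2 : Int)
    let ones : List Int :=
      ((PySem.List.enumerate c 0).filter (fun p => p.2 == 1)).map (fun p => p.1)
    let a : Int := max 0 (u - twos)
    let b : Int := max 0 (l - twos)
    let up := PySem.Set.ofList (PySem.List.slice ones none (some a))
    let low := PySem.Set.ofList (PySem.List.slice ones (some a) (some (a + b)))
    let top := (PySem.List.enumerate c 0).map
      (fun p => if p.2 == 2 || up.contains p.1 then '1' else '0')
    let bot := (PySem.List.enumerate c 0).map
      (fun p => if p.2 == 2 || low.contains p.1 then '1' else '0')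
    String.ofList (top ++ ',' :: bot)

-- ===== PRECONDITION & SPEC =====
def Spec_solution (u : Int) (l : Int) (c : List Int) (out : String) : Prop := out = solution_alt u l c
instance (u : Int) (l : Int) (c : List Int) (out : String) : Decidable (Spec_solution u l c out) := by unfold Spec_solution; infer_instance

-- ===== CLAIM (what is proved, stated in full; the proofs are below) =====
def Claim_equal_solution : Prop := ∀ (u : Int) (l : Int) (c : List Int), Dom_solution u l c → Spec_solution u l c (solution u l c)

-- ===== LEMMAS AND PROOFS =====

-- 2-indicator of a column value
def pvI2 (x : Int) : Int := if x == 2 then 1 else 0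

-- sequential reference form of A's second loop (proof-only helper)
def pvPass2 (u l : Int) : List Int → Int → Int → (List Int × List Int × Int × Int)
  | [], uc, lc => ([], [], uc, lc)
  | x :: xs, uc, lc =>
    if x == 1 then
      if uc < u then
        let r := pvPass2 u l xs (uc + 1) lc; (1 :: r.1, pvI2 x :: r.2.1, r.2.2)
      else if lc < l then
        let r := pvPass2 u l xs uc (lc + 1); (pvI2 x :: r.1, 1 :: r.2.1, r.2.2)
      else
        let r := pvPass2 u l xs uc lc; (pvI2 x :: r.1, pvI2 x :: r.2.1, r.2.2)
    else
      let r := pvPass2 u l xs uc lc; (pvI2 x :: r.1, pvI2 x :: r.2.1, r.2.2)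

-- slot-countdown reference form: a / b = remaining upper / lower slots for 1-columns
def pvRows (a b : Int) : List Int → (List Int × List Int)
  | [] => ([], [])
  | x :: xs =>
    if x == 1 then
      if 0 < a then let r := pvRows (a - 1) b xs; (1 :: r.1, 0 :: r.2)
      else if 0 < b then let r := pvRows a (b - 1) xs; (0 :: r.1, 1 :: r.2)
      else let r := pvRows a b xs; (0 :: r.1, 0 :: r.2)
    else let r := pvRows a b xs; (pvI2 x :: r.1, pvI2 x :: r.2)

def pvRender (v : Int) : Char := if v == 1 then '1' else '0'

-- positions of the 1-columns, counted from k (proof-side form of B's 'ones')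
def pvOnes (k : Int) : List Int → List Int
  | [] => []
  | x :: xs => if x == 1 then k :: pvOnes (k + 1) xs else pvOnes (k + 1) xs

-- named forms of A's loop bodies
def pvStep1 (c : List Int) (s : List Int × List Int × Int × Int) (i : Nat) :
    List Int × List Int × Int × Int :=
  if c.getD i 0 == 2 then (s.1.set i 1, s.2.1.set i 1, s.2.2.1 + 1, s.2.2.2 + 1) else s

def pvStep2 (u l : Int) (c : List Int) (s : List Int × List Int × Int × Int) (i : Nat) :
    List Int × List Int × Int × Int :=
  if c.getD i 0 == 1 then
    if s.2.2.1 < u then (s.1.set i 1, s.2.1, s.2.2.1 + 1, s.2.2.2)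
    else if s.2.2.2 < l then (s.1, s.2.1.set i 1, s.2.2.1, s.2.2.2 + 1)
    else s
  else s

-- A's port, re-stated through the named steps (definitional)
theorem pv_solution_eq (u l : Int) (c : List Int) : solution u l c =
    if c.sum ≠ u + l then "IMPOSSIBLE"
    else
      String.ofList (PySem.List.slice
        ([((List.range c.length).foldl (pvStep2 u l c)
            ((List.range c.length).foldl (pvStep1 c)
              ((List.range c.length).map (fun _ => (0 : Int)),
               (List.range c.length).map (fun _ => (0 : Int)), 0, 0))).1,
          ((List.range c.length).foldl (pvStep2 u l c)
            ((List.range c.length).foldl (pvStep1 c)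
              ((List.range c.length).map (fun _ => (0 : Int)),
               (List.range c.length).map (fun _ => (0 : Int)), 0, 0))).2.1].foldl
          (fun a row => (row.foldl (fun a v => a ++ PySem.Int.toChars v) a) ++ [',']) [])
        none (some ((c.length : Int) * 2 + 1))) := rfl

theorem pv_getD_mid (pre : List Int) (x : Int) (xs : List Int) :
    (pre ++ x :: xs).getD pre.length 0 = x := by
  simp [List.getD_eq_getElem?_getD]

theorem pv_set_mid (a0 : List Int) (x : Int) (rest : List Int) (k : Nat) (h : a0.length = k) :
    (a0 ++ x :: rest).set k 1 = a0 ++ 1 :: rest := by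
  subst h; rw [List.set_append_right _ _ (le_refl _)]; simp

-- A's first loop, generalized: marks the suffix's 2-columns and counts its 2s
theorem pv_loop1 (c : List Int) : ∀ (xs pre a0 a1 : List Int) (uc lc : Int),
    c = pre ++ xs → a0.length = pre.length → a1.length = pre.length →
    (List.range' pre.length xs.length).foldl (pvStep1 c)
      (a0 ++ xs.map (fun _ => 0), a1 ++ xs.map (fun _ => 0), uc, lc)
    = (a0 ++ xs.map pvI2, a1 ++ xs.map pvI2, uc + (xs.count 2 : Int), lc + (xs.count 2 : Int)) := by
  intro xs
  induction xs with
  | nil => intro pre a0 a1 uc lc hc h0 h1; simp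
  | cons x xs ih =>
    intro pre a0 a1 uc lc hc h0 h1
    rw [List.length_cons, List.range'_succ, List.foldl_cons]
    have hget : c.getD pre.length 0 = x := by rw [hc]; exact pv_getD_mid pre x xs
    have hc' : c = (pre ++ [x]) ++ xs := by simp [hc]
    have hlen : pre.length + 1 = (pre ++ [x]).length := by simp
    by_cases h2 : x = 2
    · have hstep : pvStep1 c
          (a0 ++ (x :: xs).map (fun _ => 0), a1 ++ (x :: xs).map (fun _ => 0), uc, lc) pre.length
          = ((a0 ++ [pvI2 x]) ++ xs.map (fun _ => 0), (a1 ++ [pvI2 x]) ++ xs.map (fun _ => 0),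
             uc + 1, lc + 1) := by
        simp only [pvStep1, hget, h2, List.map_cons, pvI2]
        rw [pv_set_mid a0 0 _ _ h0, pv_set_mid a1 0 _ _ h1]
        simp
      rw [hstep, hlen, ih (pre ++ [x]) (a0 ++ [pvI2 x]) (a1 ++ [pvI2 x]) (uc + 1) (lc + 1) hc'
            (by simp [h0, pvI2]) (by simp [h1, pvI2])]
      simp [pvI2, h2]
      constructor <;> ring
    · have hstep : pvStep1 c
          (a0 ++ (x :: xs).map (fun _ => 0), a1 ++ (x :: xs).map (fun _ => 0), uc, lc) pre.length
          = ((a0 ++ [pvI2 x]) ++ xs.map (fun _ => 0), (a1 ++ [pvI2 x]) ++ xs.map (fun _ => 0),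
             uc, lc) := by
        simp only [pvStep1, hget, List.map_cons]
        rw [if_neg (by simp [h2])]
        simp [pvI2, h2]
      rw [hstep, hlen, ih (pre ++ [x]) (a0 ++ [pvI2 x]) (a1 ++ [pvI2 x]) uc lc hc'
            (by simp [h0, pvI2]) (by simp [h1, pvI2])]
      simp [pvI2, h2]

-- A's second loop, generalized: equals the sequential pass on the suffix
theorem pv_loop2 (u l : Int) (c : List Int) : ∀ (xs pre a0 a1 : List Int) (uc lc : Int),
    c = pre ++ xs → a0.length = pre.length → a1.length = pre.length →
    (List.range' pre.length xs.length).foldl (pvStep2 u l c)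
      (a0 ++ xs.map pvI2, a1 ++ xs.map pvI2, uc, lc)
    = (a0 ++ (pvPass2 u l xs uc lc).1, a1 ++ (pvPass2 u l xs uc lc).2.1,
       (pvPass2 u l xs uc lc).2.2) := by
  intro xs
  induction xs with
  | nil => intro pre a0 a1 uc lc hc h0 h1; simp [pvPass2]
  | cons x xs ih =>
    intro pre a0 a1 uc lc hc h0 h1
    rw [List.length_cons, List.range'_succ, List.foldl_cons]
    have hget : c.getD pre.length 0 = x := by rw [hc]; exact pv_getD_mid pre x xs
    have hc' : c = (pre ++ [x]) ++ xs := by simp [hc]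
    have hlen : pre.length + 1 = (pre ++ [x]).length := by simp
    by_cases h1' : x = 1
    · by_cases hu : uc < u
      · have hstep : pvStep2 u l c
            (a0 ++ (x :: xs).map pvI2, a1 ++ (x :: xs).map pvI2, uc, lc) pre.length
            = ((a0 ++ [(1 : Int)]) ++ xs.map pvI2, (a1 ++ [pvI2 x]) ++ xs.map pvI2,
               uc + 1, lc) := by
          simp only [pvStep2, hget, h1', List.map_cons]
          rw [if_pos (by simp), if_pos hu]
          rw [pv_set_mid a0 (pvI2 1) _ _ h0]
          simp
        rw [hstep, hlen, ih (pre ++ [x]) (a0 ++ [(1 : Int)]) (a1 ++ [pvI2 x]) (uc + 1) lc hc'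
              (by simp [h0]) (by simp [h1])]
        simp [pvPass2, h1', hu]
      · by_cases hl : lc < l
        · have hstep : pvStep2 u l c
              (a0 ++ (x :: xs).map pvI2, a1 ++ (x :: xs).map pvI2, uc, lc) pre.length
              = ((a0 ++ [pvI2 x]) ++ xs.map pvI2, (a1 ++ [(1 : Int)]) ++ xs.map pvI2,
                 uc, lc + 1) := by
            simp only [pvStep2, hget, h1', List.map_cons]
            rw [if_pos (by simp), if_neg hu, if_pos hl]
            rw [pv_set_mid a1 (pvI2 1) _ _ h1]
            simp
          rw [hstep, hlen, ih (pre ++ [x]) (a0 ++ [pvI2 x]) (a1 ++ [(1 : Int)]) uc (lc + 1) hc'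
                (by simp [h0]) (by simp [h1])]
          simp [pvPass2, h1', hu, hl]
        · have hstep : pvStep2 u l c
              (a0 ++ (x :: xs).map pvI2, a1 ++ (x :: xs).map pvI2, uc, lc) pre.length
              = ((a0 ++ [pvI2 x]) ++ xs.map pvI2, (a1 ++ [pvI2 x]) ++ xs.map pvI2,
                 uc, lc) := by
            simp only [pvStep2, hget, h1', List.map_cons]
            rw [if_pos (by simp), if_neg hu, if_neg hl]
            simp
          rw [hstep, hlen, ih (pre ++ [x]) (a0 ++ [pvI2 x]) (a1 ++ [pvI2 x]) uc lc hc'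
                (by simp [h0]) (by simp [h1])]
          simp [pvPass2, h1', hu, hl]
    · have hstep : pvStep2 u l c
          (a0 ++ (x :: xs).map pvI2, a1 ++ (x :: xs).map pvI2, uc, lc) pre.length
          = ((a0 ++ [pvI2 x]) ++ xs.map pvI2, (a1 ++ [pvI2 x]) ++ xs.map pvI2, uc, lc) := by
        simp only [pvStep2, hget, List.map_cons]
        rw [if_neg (by simp [h1'])]
        simp
      rw [hstep, hlen, ih (pre ++ [x]) (a0 ++ [pvI2 x]) (a1 ++ [pvI2 x]) uc lc hc'
            (by simp [h0]) (by simp [h1])]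
      simp [pvPass2, h1']

-- A's sequential pass is the slot-countdown form with a = u - uc, b = l - lc
theorem pv_pass2_rows (u l : Int) : ∀ (xs : List Int) (uc lc : Int),
    (pvPass2 u l xs uc lc).1 = (pvRows (u - uc) (l - lc) xs).1 ∧
    (pvPass2 u l xs uc lc).2.1 = (pvRows (u - uc) (l - lc) xs).2 := by
  intro xs
  induction xs with
  | nil => intro uc lc; simp [pvPass2, pvRows]
  | cons x xs ih =>
    intro uc lc
    by_cases h1 : x = 1
    · by_cases hu : uc < u
      · have ha : (0 : Int) < u - uc := by omega
        have e1 : u - (uc + 1) = (u - uc) - 1 := by ring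
        simp only [pvPass2, pvRows, h1, if_pos (by simp : ((1:Int) == 1) = true), if_pos hu,
          if_pos ha, pvI2]
        have := ih (uc + 1) lc
        rw [e1] at this
        simp [this.1, this.2]
      · have ha : ¬ (0 : Int) < u - uc := by omega
        by_cases hl : lc < l
        · have hb : (0 : Int) < l - lc := by omega
          have e1 : l - (lc + 1) = (l - lc) - 1 := by ring
          simp only [pvPass2, pvRows, h1, if_pos (by simp : ((1:Int) == 1) = true), if_neg hu,
            if_pos hl, if_neg ha, if_pos hb, pvI2]
          have := ih uc (lc + 1)
          rw [e1] at this
          simp [this.1, this.2]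
        · have hb : ¬ (0 : Int) < l - lc := by omega
          simp only [pvPass2, pvRows, h1, if_pos (by simp : ((1:Int) == 1) = true), if_neg hu,
            if_neg hl, if_neg ha, if_neg hb, pvI2]
          have := ih uc lc
          simp [this.1, this.2]
    · simp only [pvPass2, pvRows, if_neg (by simp [h1] : ¬ ((x == 1) = true))]
      have := ih uc lc
      simp [this.1, this.2]

-- negative slot counts behave like zero
theorem pv_rows_max : ∀ (xs : List Int) (a b : Int),
    pvRows a b xs = pvRows (max 0 a) (max 0 b) xs := by
  intro xs
  induction xs with
  | nil => intro a b; simp [pvRows]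
  | cons x xs ih =>
    intro a b
    by_cases h1 : x = 1
    · by_cases ha : (0 : Int) < a
      · have hma : max 0 a = a := by omega
        simp only [pvRows, h1, if_pos (by simp : ((1:Int) == 1) = true), hma, if_pos ha]
        have := ih (a - 1) b
        rw [show max 0 (a - 1) = a - 1 by omega] at this
        rw [this]
      · have hma : max 0 a = 0 := by omega
        by_cases hb : (0 : Int) < b
        · have hmb : max 0 b = b := by omega
          simp only [pvRows, h1, if_pos (by simp : ((1:Int) == 1) = true), hma, hmb,
            if_neg ha, if_neg (by omega : ¬ (0:Int) < 0), if_pos hb]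
          rw [ih a (b - 1), hma, show max 0 (b - 1) = b - 1 by omega]
        · have hmb : max 0 b = 0 := by omega
          simp only [pvRows, h1, if_pos (by simp : ((1:Int) == 1) = true), hma, hmb,
            if_neg ha, if_neg hb, if_neg (by omega : ¬ (0:Int) < 0)]
          rw [ih a b, show max 0 a = 0 by omega, show max 0 b = 0 by omega]
    · simp only [pvRows, if_neg (by simp [h1] : ¬ ((x == 1) = true))]
      rw [ih a b]

-- elements of pvOnes k xs are ≥ k
theorem pv_ones_ge : ∀ (xs : List Int) (k i : Int), i ∈ pvOnes k xs → k ≤ i := by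
  intro xs
  induction xs with
  | nil => intro k i h; simp [pvOnes] at h
  | cons x xs ih =>
    intro k i h
    by_cases h1 : x = 1 <;> simp [pvOnes, h1] at h
    · rcases h with h | h
      · omega
      · have := ih (k + 1) i h; omega
    · have := ih (k + 1) i h; omega

-- B's 'ones' computation is pvOnes
theorem pv_ones_eq : ∀ (xs : List Int) (k : Int),
    ((PySem.List.enumerate xs k).filter (fun p => p.2 == 1)).map (fun p => p.1) = pvOnes k xs := by
  intro xs
  induction xs with
  | nil => intro k; simp [PySem.List.enumerate_nil, pvOnes]
  | cons x xs ih =>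
    intro k
    rw [PySem.List.enumerate_cons]
    by_cases h1 : x = 1 <;> simp [pvOnes, h1, ih]

-- B's rendered rows are the slot-countdown rows: membership in the slices of the
-- 1-positions is exactly the rank test against the two thresholds
-- dropping the current index from the head of a membership set does not change later columns
theorem pv_map_drop_head (xs : List Int) (k : Int) (S : List Int) :
    (PySem.List.enumerate xs (k + 1)).map
        (fun p => if p.2 == 2 || (k :: S).contains p.1 then '1' else '0')
      = (PySem.List.enumerate xs (k + 1)).map
        (fun p => if p.2 == 2 || S.contains p.1 then '1' else '0') := by
  apply List.map_congr_left
  intro p hp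
  rcases (PySem.List.mem_enumerate_iff xs (k + 1) p).mp hp with ⟨j, hj, rfl⟩
  have : ((k + 1 + (j : Int), xs[j]).1 == k) = false := by simp; omega
  simp only [List.contains_cons, this, Bool.false_or]

theorem pv_rowsB : ∀ (xs : List Int) (k : Int) (a b : Nat),
    ((PySem.List.enumerate xs k).map
        (fun p => if p.2 == 2 || ((pvOnes k xs).take a).contains p.1 then '1' else '0')
      = ((pvRows (a : Int) (b : Int) xs).1).map pvRender) ∧
    ((PySem.List.enumerate xs k).map
        (fun p => if p.2 == 2 || (((pvOnes k xs).drop a).take b).contains p.1 then '1' else '0')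
      = ((pvRows (a : Int) (b : Int) xs).2).map pvRender) := by
  intro xs
  induction xs with
  | nil => intro k a b; simp [PySem.List.enumerate_nil, pvRows, pvOnes]
  | cons x xs ih =>
    intro k a b
    have hRge : ∀ i ∈ pvOnes (k + 1) xs, ¬ (i = k) := by
      intro i h hik; have := pv_ones_ge xs (k + 1) i h; omega
    rw [PySem.List.enumerate_cons, List.map_cons, List.map_cons]
    by_cases hx1 : x = 1
    · subst hx1
      simp only [pvOnes, if_pos (by simp : ((1 : Int) == 1) = true)]
      cases a with
      | zero =>
        simp only [List.take_zero, List.drop_zero, List.contains_nil, Bool.or_false,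
          Nat.cast_zero]
        cases b with
        | zero =>
          simp only [pvRows, if_pos (by simp : ((1 : Int) == 1) = true), Nat.cast_zero,
            if_neg (by omega : ¬ (0 : Int) < (0 : Int)), List.take_zero, List.contains_nil,
            Bool.or_false, List.map_cons, List.cons.injEq]
          refine ⟨⟨by decide, ?_⟩, ⟨by decide, ?_⟩⟩
          · have H := (ih (k + 1) 0 0).1
            simp only [List.take_zero, List.contains_nil, Bool.or_false, Nat.cast_zero] at H
            exact H
          · have H := (ih (k + 1) 0 0).2
            simp only [List.take_zero, List.drop_zero, List.contains_nil, Bool.or_false,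
              Nat.cast_zero] at H
            exact H
        | succ b' =>
          have hc : (0 : Int) < ((b' + 1 : Nat) : Int) := by push_cast; omega
          have hcast : ((b' + 1 : Nat) : Int) - 1 = ((b' : Nat) : Int) := by push_cast; ring
          simp only [pvRows, if_pos (by simp : ((1 : Int) == 1) = true),
            if_neg (by omega : ¬ (0 : Int) < (0 : Int)), if_pos hc, hcast,
            List.take_succ_cons, List.map_cons, List.cons.injEq]
          refine ⟨⟨by decide, ?_⟩, ⟨by simp [pvRender], ?_⟩⟩
          · have H := (ih (k + 1) 0 b').1
            simp only [List.take_zero, List.contains_nil, Bool.or_false, Nat.cast_zero] at H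
            exact H
          · have H := (ih (k + 1) 0 b').2
            simp only [List.drop_zero, Nat.cast_zero] at H
            exact (pv_map_drop_head xs k _).trans H
      | succ a' =>
        have hc : (0 : Int) < ((a' + 1 : Nat) : Int) := by push_cast; omega
        have hcast : ((a' + 1 : Nat) : Int) - 1 = ((a' : Nat) : Int) := by push_cast; ring
        simp only [pvRows, if_pos (by simp : ((1 : Int) == 1) = true), if_pos hc, hcast,
          List.take_succ_cons, List.drop_succ_cons, List.map_cons, List.cons.injEq]
        have hk2 : ((((pvOnes (k + 1) xs).drop a').take b).contains k) = false := by
          simp only [List.contains_eq_mem, decide_eq_false_iff_not]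
          intro hmem
          exact hRge k (List.mem_of_mem_drop (List.mem_of_mem_take hmem)) rfl
        refine ⟨⟨by simp [pvRender], ?_⟩, ⟨?_, ?_⟩⟩
        · exact (pv_map_drop_head xs k _).trans (ih (k + 1) a' b).1
        · simp only [hk2, Bool.or_false]; decide
        · exact (ih (k + 1) a' b).2
    · have hO : pvOnes k (x :: xs) = pvOnes (k + 1) xs := by simp [pvOnes, hx1]
      simp only [hO, pvRows, if_neg (by simp [hx1] : ¬ ((x == 1) = true)), List.map_cons,
        List.cons.injEq]
      have hk1 : (((pvOnes (k + 1) xs).take a).contains k) = false := by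
        simp only [List.contains_eq_mem, decide_eq_false_iff_not]
        intro hmem; exact hRge k (List.mem_of_mem_take hmem) rfl
      have hk2 : ((((pvOnes (k + 1) xs).drop a).take b).contains k) = false := by
        simp only [List.contains_eq_mem, decide_eq_false_iff_not]
        intro hmem; exact hRge k (List.mem_of_mem_drop (List.mem_of_mem_take hmem)) rfl
      have hhead : ∀ (s : Bool), s = false →
          (if (x == 2) || s then '1' else '0') = pvRender (pvI2 x) := by
        intro s hs; subst hs
        by_cases hx2 : x = 2 <;> simp [pvI2, pvRender, hx2]
      exact ⟨⟨hhead _ hk1, (ih (k + 1) a b).1⟩, ⟨hhead _ hk2, (ih (k + 1) a b).2⟩⟩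

-- pvRows rows hold only 0s and 1s, and have the input's length
theorem pv_rows_mem : ∀ (xs : List Int) (a b : Int),
    (∀ v ∈ (pvRows a b xs).1, v = 0 ∨ v = 1) ∧ (∀ v ∈ (pvRows a b xs).2, v = 0 ∨ v = 1) := by
  intro xs
  induction xs with
  | nil => intro a b; simp [pvRows]
  | cons x xs ih =>
    intro a b
    simp only [pvRows, pvI2]
    split_ifs <;>
      refine ⟨fun v hv => ?_, fun v hv => ?_⟩ <;> simp at hv <;>
      rcases hv with h | h <;>
        first
          | (subst h; simp)
          | omega
          | exact (ih _ _).1 v h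
          | exact (ih _ _).2 v h

theorem pv_rows_len : ∀ (xs : List Int) (a b : Int),
    (pvRows a b xs).1.length = xs.length ∧ (pvRows a b xs).2.length = xs.length := by
  intro xs
  induction xs with
  | nil => intro a b; simp [pvRows]
  | cons x xs ih =>
    intro a b
    simp only [pvRows, pvI2]
    split_ifs <;> simp [ih]

-- rendering a 0/1 row by str() concatenation is mapping pvRender
theorem pv_row_chars : ∀ (row : List Int) (a : List Char), (∀ v ∈ row, v = 0 ∨ v = 1) →
    row.foldl (fun a v => a ++ PySem.Int.toChars v) a = a ++ row.map pvRender := by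
  intro row
  induction row with
  | nil => simp
  | cons v row ih =>
    intro a h
    rcases h v (by simp) with h0 | h0 <;> subst h0 <;>
      rw [List.foldl_cons, ih _ (fun v hv => h v (by simp [hv]))] <;> simp [pvRender] <;> rfl

-- B's port, re-stated with the lets inlined (definitional)
theorem pv_solution_alt_eq (u l : Int) (c : List Int) : solution_alt u l c =
    if c.sum ≠ u + l then "IMPOSSIBLE"
    else
      String.ofList (
        (PySem.List.enumerate c 0).map
          (fun p => if p.2 == 2 ||
            (PySem.Set.ofList (PySem.List.slice
              (((PySem.List.enumerate c 0).filter (fun p => p.2 == 1)).map (fun p => p.1))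
              none (some (max 0 (u - (c.count 2 : Int)))))).contains p.1 then '1' else '0')
        ++ ',' :: (PySem.List.enumerate c 0).map
          (fun p => if p.2 == 2 ||
            (PySem.Set.ofList (PySem.List.slice
              (((PySem.List.enumerate c 0).filter (fun p => p.2 == 1)).map (fun p => p.1))
              (some (max 0 (u - (c.count 2 : Int))))
              (some ((max 0 (u - (c.count 2 : Int))) + (max 0 (l - (c.count 2 : Int))))))).contains
                p.1 then '1' else '0')) := rfl

-- the 1-positions are pairwise distinct
theorem pv_ones_nodup : ∀ (xs : List Int) (k : Int), (pvOnes k xs).Nodup := by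
  intro xs
  induction xs with
  | nil => intro k; simp [pvOnes]
  | cons x xs ih =>
    intro k
    by_cases h1 : x = 1 <;> simp only [pvOnes, h1]
    · simp only [if_pos (by simp : ((1 : Int) == 1) = true)]
      refine List.nodup_cons.mpr ⟨fun hmem => ?_, ih (k + 1)⟩
      have := pv_ones_ge xs (k + 1) k hmem; omega
    · rw [if_neg (by simp [h1])]
      exact ih (k + 1)

-- ===== VERDICT (by name: the statement is the Claim_ definition above) =====
theorem solution_spec : Claim_equal_solution := by
  intro u l c _
  unfold Spec_solution
  rw [pv_solution_eq, pv_solution_alt_eq]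
  split_ifs with hs
  · rfl
  · -- shared abbreviations
    have h0a : (0 : Int) ≤ max 0 (u - (c.count 2 : Int)) := le_max_left 0 _
    have h0b : (0 : Int) ≤ max 0 (l - (c.count 2 : Int)) := le_max_left 0 _
    -- A side: the two loops produce pvRows applied to the slot budgets
    have h1 := pv_loop1 c c [] [] [] 0 0 (by simp) rfl rfl
    simp only [List.length_nil, List.nil_append, zero_add] at h1
    have h2 := pv_loop2 u l c c [] [] [] ((c.count 2 : Int)) ((c.count 2 : Int))
      (by simp) rfl rfl
    simp only [List.length_nil, List.nil_append] at h2
    rw [show ((List.range c.length).map (fun _ => (0 : Int)))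
          = c.map (fun _ => (0 : Int)) by simp [List.map_const'], List.range_eq_range']
    rw [h1, h2]
    have hrows := pv_pass2_rows u l c ((c.count 2 : Int)) ((c.count 2 : Int))
    rw [hrows.1, hrows.2,
      pv_rows_max c (u - (c.count 2 : Int)) (l - (c.count 2 : Int))]
    have hmem := pv_rows_mem c (max 0 (u - (c.count 2 : Int))) (max 0 (l - (c.count 2 : Int)))
    have hlen := pv_rows_len c (max 0 (u - (c.count 2 : Int))) (max 0 (l - (c.count 2 : Int)))
    rw [List.foldl_cons, List.foldl_cons, List.foldl_nil,
        pv_row_chars _ _ hmem.1, pv_row_chars _ _ hmem.2]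
    -- strip the trailing comma with the slice
    have hb : ((c.length : Int) * 2 + 1) = ((2 * c.length + 1 : Nat) : Int) := by push_cast; ring
    rw [hb, PySem.List.slice_to_natCast]
    set T := ((pvRows (max 0 (u - (c.count 2 : Int))) (max 0 (l - (c.count 2 : Int))) c).1).map
      pvRender with hT
    set Bt := ((pvRows (max 0 (u - (c.count 2 : Int))) (max 0 (l - (c.count 2 : Int))) c).2).map
      pvRender with hBt
    have hX : ((([] ++ T) ++ [',']) ++ Bt).length = 2 * c.length + 1 := by
      simp [hT, hBt, hlen.1, hlen.2]; ring
    rw [show (((([] ++ T) ++ [',']) ++ Bt) ++ [','])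
        = ((([] ++ T) ++ [',']) ++ Bt) ++ [','] from rfl, ← hX, List.take_left]
    -- B side: collapse the slices and the set, then apply pv_rowsB
    have hones := pv_ones_eq c 0
    have hnd := pv_ones_nodup c 0
    rw [hones, PySem.List.slice_to _ h0a,
        PySem.List.slice_toNat _ h0a (by omega : (0:Int) ≤ _)]
    have hsub : ((max 0 (u - (c.count 2 : Int))) + (max 0 (l - (c.count 2 : Int)))).toNat
        - (max 0 (u - (c.count 2 : Int))).toNat = (max 0 (l - (c.count 2 : Int))).toNat := by
      omega
    rw [hsub]
    simp only [PySem.Set.ofList_eq_self_of_nodup _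
          (List.Sublist.nodup (List.take_sublist _ _) hnd),
        PySem.Set.ofList_eq_self_of_nodup _
          (List.Sublist.nodup (List.take_sublist _ _)
            (List.Sublist.nodup (List.drop_sublist _ _) hnd)),
        PySem.Set.contains_eq_listContains]
    have hB := pv_rowsB c 0 (max 0 (u - (c.count 2 : Int))).toNat
      (max 0 (l - (c.count 2 : Int))).toNat
    rw [Int.toNat_of_nonneg h0a, Int.toNat_of_nonneg h0b] at hB
    rw [hB.1, hB.2]
    simp [hT, hBt]
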